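-- pv_equiv track=rewrite | github.com/mateozorzi/TDA | RPL_2025/3.PrgDinamica/ej5_laberinto.py | buscarOptimos
-- ===== SOURCE A (Python) =====
-- def buscarOptimos(matriz):
--     fil = len(matriz)
--     col = len(matriz[0])
--
--     optimos = [[0] * (col+1) for _ in range(fil+1)]
--
--     #Ec de recurrecnia: -> opt[i][j] = max(opt[i-1][j], opt[i][j-1])
--     for i in range(1,len(optimos)):
--         for j in range(1, len(optimos[0])):
--             #si hay obstaculos:
--             if matriz[i-1][j-1] == 0:
--                 optimos[i][j] = 0
--                 continue
--             if optimos[i-1][j] == 0 and  optimos[i][j-1] == 0 and (i,j) != (1,1):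
--                 optimos[i][j] = 0
--                 continue
--             optimos[i][j] = max(optimos[i-1][j], optimos[i][j-1]) + matriz[i-1][j-1]
--
--     #la rta optima estara en el casillero i = n, j = m
--     return optimos
-- ===== SOURCE B (Python) =====
-- # B: top-down memoized recursion on the same recurrence, instead of A's
-- # bottom-up in-place table fill; the table is produced by querying val(i,j).
-- def buscarOptimos(matriz):
--     fil = len(matriz)
--     col = len(matriz[0])
--     memo = {}
--
--     def val(i, j):
--         if i == 0 or j == 0:
--             return 0
--         if (i, j) in memo:
--             return memo[(i, j)]
--         c = matriz[i - 1][j - 1]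
--         if c == 0:
--             r = 0
--         else:
--             up = val(i - 1, j)
--             left = val(i, j - 1)
--             if up == 0 and left == 0 and (i, j) != (1, 1):
--                 r = 0
--             else:
--                 r = max(up, left) + c
--         memo[(i, j)] = r
--         return r
--
--     return [[val(i, j) for j in range(col + 1)] for i in range(fil + 1)]
-- ===== Notes on version B (the rewrite author's own statement) =====
-- stated objective: alternative
-- what changed: A fills a preallocated (fil+1)x(col+1) table bottom-up by in-place double-indexed mutation; B computes each cell by top-down memoized recursion val(i,j) with a dict cache and builds the table by querying val.
import Mathlib
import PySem

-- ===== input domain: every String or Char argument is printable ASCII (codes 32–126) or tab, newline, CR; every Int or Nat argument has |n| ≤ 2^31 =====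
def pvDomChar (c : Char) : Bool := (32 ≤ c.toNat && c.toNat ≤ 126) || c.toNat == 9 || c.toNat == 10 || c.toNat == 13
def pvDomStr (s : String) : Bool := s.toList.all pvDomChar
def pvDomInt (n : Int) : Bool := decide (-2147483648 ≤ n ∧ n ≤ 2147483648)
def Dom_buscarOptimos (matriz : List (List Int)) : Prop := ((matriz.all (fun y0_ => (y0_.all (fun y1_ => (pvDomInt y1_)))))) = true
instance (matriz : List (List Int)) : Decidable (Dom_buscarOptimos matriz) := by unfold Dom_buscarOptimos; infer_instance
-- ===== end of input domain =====

-- B replaces A's bottom-up in-place table fill by top-down memoized recursion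
-- (val(i,j) with a dict cache; the table is produced by querying val);
-- objective: alternative decomposition, same asymptotic cost.

-- ===== PORT A =====
-- optimos[i][j] = v ; exact for 0 ≤ i < len(t), 0 ≤ j (the only way A uses it: i,j come from range(1,…))
def pvSet2 (t : List (List Int)) (i j : Int) (v : Int) : List (List Int) :=
  t.set i.toNat ((t.getD i.toNat []).set j.toNat v)

-- one inner-loop step of A (the body under `for j in …`)
def pvInnerA (matriz : List (List Int)) (i : Int) (t : List (List Int)) (j : Int) : List (List Int) :=
  let c := PySem.List.pyGetD (PySem.List.pyGetD matriz (i-1) []) (j-1) 0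
  if c = 0 then pvSet2 t i j 0
  else
    let up := PySem.List.pyGetD (PySem.List.pyGetD t (i-1) []) j 0
    let left := PySem.List.pyGetD (PySem.List.pyGetD t i []) (j-1) 0
    if up = 0 ∧ left = 0 ∧ ¬(i = 1 ∧ j = 1) then pvSet2 t i j 0
    else pvSet2 t i j (max up left + c)

def buscarOptimos (matriz : List (List Int)) : List (List Int) :=
  let fil := matriz.length
  let col := (PySem.List.pyGetD matriz 0 []).length   -- len(matriz[0]); Pre_ rules out matriz = []
  let optimos := List.replicate (fil+1) (List.replicate (col+1) (0:Int))
  (PySem.List.pyRange 1 (optimos.length) 1).foldl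
    (fun t i =>
      (PySem.List.pyRange 1 ((PySem.List.pyGetD t 0 []).length) 1).foldl (pvInnerA matriz i) t)
    optimos

-- ===== PORT B =====
-- Source B's `val(i, j)`: the memo dict is threaded through as state (Python mutates it in place).
-- matriz[i-1][j-1] is ported with pyGetD; under Pre_ the indices B uses are always in range.
def pvValM (matriz : List (List Int)) :
    Nat → Nat → PySem.Dict (Nat × Nat) Int → Int × PySem.Dict (Nat × Nat) Int
  | 0, _, memo => (0, memo)
  | _+1, 0, memo => (0, memo)
  | i+1, j+1, memo =>
    match memo.get? (i+1, j+1) with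
    | some r => (r, memo)
    | none =>
      let c := PySem.List.pyGetD (PySem.List.pyGetD matriz ((i:Int)+1-1) []) ((j:Int)+1-1) 0
      if c = 0 then (0, memo.insert (i+1, j+1) 0)
      else
        let up := pvValM matriz i (j+1) memo
        let left := pvValM matriz (i+1) j up.2
        let r := if up.1 = 0 ∧ left.1 = 0 ∧ ¬(i+1 = 1 ∧ j+1 = 1) then 0
                 else max up.1 left.1 + c
        (r, left.2.insert (i+1, j+1) r)
termination_by i j memo => i + j
decreasing_by all_goals omega

def buscarOptimos_alt (matriz : List (List Int)) : List (List Int) :=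
  let fil := matriz.length
  let col := (PySem.List.pyGetD matriz 0 []).length   -- len(matriz[0]); Pre_ rules out matriz = []
  (((List.range (fil+1)).foldl
      (fun (st : List (List Int) × PySem.Dict (Nat × Nat) Int) i =>
        let r := (List.range (col+1)).foldl
          (fun (st2 : List Int × PySem.Dict (Nat × Nat) Int) j =>
            let v := pvValM matriz i j st2.2
            (st2.1 ++ [v.1], v.2))
          ([], st.2)
        (st.1 ++ [r.1], r.2))
      ([], PySem.Dict.empty))).1

-- ===== PRECONDITION & SPEC =====
-- Pre_ admits exactly the inputs where A returns: a nonempty matrix whose every row is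
-- at least as long as the first (A raises IndexError on [] and on shorter rows).
def Pre_buscarOptimos (matriz : List (List Int)) : Prop :=
  matriz ≠ [] ∧ ∀ row ∈ matriz, (matriz.headD []).length ≤ row.length
instance (matriz : List (List Int)) : Decidable (Pre_buscarOptimos matriz) := by
  unfold Pre_buscarOptimos; infer_instance
def pvWitness_buscarOptimos : List (List Int) := [[1, 2], [3, 4]]

def Spec_buscarOptimos (matriz : List (List Int)) (out : List (List Int)) : Prop := out = buscarOptimos_alt matriz
instance (matriz : List (List Int)) (out : List (List Int)) : Decidable (Spec_buscarOptimos matriz out) := by unfold Spec_buscarOptimos; infer_instance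

-- ===== CLAIM (what is proved, stated in full; the proofs are below) =====
def Claim_equal_buscarOptimos : Prop := ∀ (matriz : List (List Int)), Dom_buscarOptimos matriz → Pre_buscarOptimos matriz → Spec_buscarOptimos matriz (buscarOptimos matriz)

-- ===== LEMMAS AND PROOFS =====

-- the unique solution of the recurrence, as a pure function (proof-only helper)
def pvVal (matriz : List (List Int)) : Nat → Nat → Int
  | 0, _ => 0
  | _+1, 0 => 0
  | i+1, j+1 =>
    let c := (matriz.getD i []).getD j 0
    if c = 0 then 0
    else
      let up := pvVal matriz i (j+1)
      let left := pvVal matriz (i+1) j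
      if up = 0 ∧ left = 0 ∧ ¬(i = 0 ∧ j = 0) then 0 else max up left + c
termination_by i j => i + j
decreasing_by all_goals omega

-- cache invariant: every memo entry holds the recurrence's value
def pvInv (matriz : List (List Int)) (memo : PySem.Dict (Nat × Nat) Int) : Prop :=
  ∀ i j r, memo.get? (i, j) = some r → r = pvVal matriz i j

theorem pvVal_succ (matriz : List (List Int)) (i j : Nat) :
    pvVal matriz (i+1) (j+1)
      = (if (matriz.getD i []).getD j 0 = 0 then 0
         else if pvVal matriz i (j+1) = 0 ∧ pvVal matriz (i+1) j = 0 ∧ ¬(i = 0 ∧ j = 0) then 0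
         else max (pvVal matriz i (j+1)) (pvVal matriz (i+1) j) + (matriz.getD i []).getD j 0) := by
  rw [pvVal]

theorem pvValM_spec (matriz : List (List Int)) :
    ∀ (n i j : Nat) (memo : PySem.Dict (Nat × Nat) Int), i + j ≤ n → pvInv matriz memo →
      (pvValM matriz i j memo).1 = pvVal matriz i j ∧ pvInv matriz (pvValM matriz i j memo).2 := by
  intro n
  induction n with
  | zero =>
      intro i j memo hn hinv
      have hi : i = 0 := by omega
      subst hi
      simp [pvValM, pvVal, hinv]
  | succ n ih =>
      intro i j memo hn hinv
      match i, j with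
      | 0, j => simp [pvValM, pvVal, hinv]
      | i+1, 0 => simp [pvValM, pvVal, hinv]
      | i+1, j+1 =>
        rw [pvValM]
        cases hget : memo.get? (i+1, j+1) with
        | some r =>
            simp only []
            exact ⟨hinv _ _ _ hget, hinv⟩
        | none =>
            simp only []
            have hc : PySem.List.pyGetD (PySem.List.pyGetD matriz ((i:Int)+1-1) []) ((j:Int)+1-1) 0
                = (matriz.getD i []).getD j 0 := by
              rw [show ((i:Int)+1-1) = ((i:Nat):Int) by ring, PySem.List.pyGetD_natCast,
                show ((j:Int)+1-1) = ((j:Nat):Int) by ring, PySem.List.pyGetD_natCast]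
            have hins : ∀ (v : Int) (d : PySem.Dict (Nat × Nat) Int), pvInv matriz d →
                v = pvVal matriz (i+1) (j+1) → pvInv matriz (d.insert (i+1, j+1) v) := by
              intro v d hd hv a b r hr
              rw [PySem.Dict.get?_insert] at hr
              by_cases h : ((a, b) : Nat × Nat) = (i+1, j+1)
              · rw [if_pos h] at hr
                injection hr with hr
                have h' : a = i+1 ∧ b = j+1 := by simpa [Prod.ext_iff] using h
                rw [h'.1, h'.2, ← hr, hv]
              · rw [if_neg h] at hr; exact hd _ _ _ hr
            by_cases hc0 : (matriz.getD i []).getD j 0 = 0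
            · rw [if_pos (hc.trans hc0)]
              refine ⟨?_, hins 0 memo hinv ?_⟩ <;>
                rw [pvVal_succ, if_pos hc0]
            · rw [if_neg (fun h => hc0 (hc ▸ h))]
              have h1 := ih i (j+1) memo (by omega) hinv
              have h2 := ih (i+1) j (pvValM matriz i (j+1) memo).2 (by omega) h1.2
              have hval : (if (pvValM matriz i (j+1) memo).1 = 0 ∧
                    (pvValM matriz (i+1) j (pvValM matriz i (j+1) memo).2).1 = 0 ∧ ¬(i+1 = 1 ∧ j+1 = 1)
                  then (0:Int)
                  else max (pvValM matriz i (j+1) memo).1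
                        (pvValM matriz (i+1) j (pvValM matriz i (j+1) memo).2).1
                    + PySem.List.pyGetD (PySem.List.pyGetD matriz ((i:Int)+1-1) []) ((j:Int)+1-1) 0)
                  = pvVal matriz (i+1) (j+1) := by
                rw [h1.1, h2.1, hc, pvVal_succ]
                simp only [if_neg hc0]
                have : (i+1 = 1 ∧ j+1 = 1) ↔ (i = 0 ∧ j = 0) := by omega
                simp only [this]
              refine ⟨hval, hins _ _ h2.2 hval⟩


-- the all-zero row of width col+1
def pvZ (col : Nat) : List Int := List.replicate (col+1) (0:Int)

-- the value of cell (i,j) given its up/left neighbours and the matrix entry c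
def pvCell (i j : Nat) (up left c : Int) : Int :=
  if c = 0 ∨ (up = 0 ∧ left = 0 ∧ ¬(i = 1 ∧ j = 1)) then 0 else max up left + c

-- B's inner loop as structural recursion over the remaining cells
def pvGo (i : Nat) (prev : List Int) : List Int → Nat → List Int → List Int
  | [], _, cur => cur
  | c :: rest, j, cur =>
      pvGo i prev rest (j+1) (cur ++ [pvCell i j (prev.getD j 0) (cur.getLastD 0) c])

def pvRow (i : Nat) (prev fila : List Int) (col : Nat) : List Int :=
  pvGo i prev (fila.take col) 1 [0]

-- A's table rows as structural recursion over the rows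
def pvRows (col : Nat) : List (List Int) → Nat → List Int → List (List Int)
  | [], _, _ => []
  | fila :: rest, i, prev => pvRow i prev fila col :: pvRows col rest (i+1) (pvRow i prev fila col)

theorem pvGo_length (i : Nat) (prev : List Int) :
    ∀ (l : List Int) (j : Nat) (cur : List Int), (pvGo i prev l j cur).length = cur.length + l.length := by
  intro l; induction l with
  | nil => simp [pvGo]
  | cons c rest ih => intro j cur; simp [pvGo, ih]; omega

theorem pvGo_snoc (i : Nat) (prev : List Int) :
    ∀ (l : List Int) (c : Int) (j : Nat) (cur : List Int),
      pvGo i prev (l ++ [c]) j cur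
        = pvGo i prev l j cur
          ++ [pvCell i (j + l.length) (prev.getD (j + l.length) 0)
               ((pvGo i prev l j cur).getLastD 0) c] := by
  intro l; induction l with
  | nil => simp [pvGo]
  | cons c0 rest ih =>
      intro c j cur
      simp only [List.cons_append, pvGo, ih]
      have h1 : j + (c0 :: rest).length = j + 1 + rest.length := by simp only [List.length_cons]; omega
      rw [h1]

theorem pvRows_length (col : Nat) :
    ∀ (l : List (List Int)) (i : Nat) (prev : List Int), (pvRows col l i prev).length = l.length := by
  intro l; induction l with
  | nil => simp [pvRows]
  | cons fila rest ih => intro i prev; simp [pvRows, ih]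

theorem pvRows_snoc (col : Nat) :
    ∀ (l : List (List Int)) (x : List Int) (i : Nat) (prev : List Int),
      pvRows col (l ++ [x]) i prev
        = pvRows col l i prev
          ++ [pvRow (i + l.length) ((pvRows col l i prev).getLastD prev) x col] := by
  intro l; induction l with
  | nil => simp [pvRows]
  | cons fila rest ih =>
      intro x i prev
      simp only [List.cons_append, pvRows, ih]
      simp only [List.getLastD_cons]
      have h1 : i + (fila :: rest).length = i + 1 + rest.length := by simp only [List.length_cons]; omega
      rw [h1]

-- (x :: rs).getD rs.length d = rs.getLastD x
theorem pv_getD_last {α : Type} : ∀ (rs : List α) (x d : α), (x :: rs).getD rs.length d = rs.getLastD x := by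
  intro rs; induction rs with
  | nil => simp
  | cons y rest ih =>
      intro x d
      rw [List.length_cons, List.getD_cons_succ, ih y d, List.getLastD_cons]

-- cur.length = m+1 → cur.getD m 0 = cur.getLastD 0
theorem pv_getD_pred (cur : List Int) (m : Nat) (h : cur.length = m + 1) :
    cur.getD m 0 = cur.getLastD 0 := by
  cases cur with
  | nil => simp at h
  | cons a l =>
      have : l.length = m := by simpa using h
      subst this
      rw [List.getLastD_cons]
      exact pv_getD_last l a 0

theorem pv_pyGetD_zero {α : Type} (xs : List α) (d : α) :
    PySem.List.pyGetD xs 0 d = xs.headD d := by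
  cases xs <;> simp [PySem.List.pyGetD, PySem.List.pyIdx?, PySem.List.pyGet?]

-- branch selection in A's inner body is pvCell
theorem pv_branch {α : Type} (k m : Nat) (up left c : Int) (f : Int → α) :
    (if c = 0 then f 0
     else if up = 0 ∧ left = 0 ∧ ¬((k:Int) + 1 = 1 ∧ (m:Int) + 1 = 1) then f 0
     else f (max up left + c))
    = f (pvCell (k+1) (m+1) up left c) := by
  unfold pvCell
  have h1 : (((k:Int)) + 1 = 1 ∧ ((m:Int)) + 1 = 1) ↔ (k + 1 = 1 ∧ m + 1 = 1) := by omega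
  split_ifs <;> tauto

-- the inner fold of A rebuilds one row, up to m cells
theorem pv_innerA (matriz : List (List Int)) (col k : Nat)
    (fila : List Int) (hfila : fila = matriz.getD k []) (hcol : col ≤ fila.length)
    (rs Z' : List (List Int)) (hlen : rs.length = k)
    (prev : List Int) (hprev : prev = rs.getLastD (pvZ col)) :
    ∀ (m : Nat), m ≤ col →
      (PySem.List.pyRange 1 ((m : Int) + 1) 1).foldl (pvInnerA matriz ((k : Int) + 1))
          ((pvZ col :: rs) ++ pvZ col :: Z')
        = (pvZ col :: rs)
            ++ (pvGo (k+1) prev (fila.take m) 1 [0] ++ List.replicate (col - m) (0:Int)) :: Z' := by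
  intro m
  induction m with
  | zero =>
      intro _
      rw [show ((0:Nat):Int) + 1 = 1 by simp]
      rw [show PySem.List.pyRange 1 1 1 = [] from rfl, List.foldl_nil]
      simp [pvGo, pvZ, List.replicate_succ]
  | succ m ih =>
      intro hm1
      have hm : m ≤ col := Nat.le_of_succ_le hm1
      have hmc : m < col := hm1
      have hmf : m < fila.length := lt_of_lt_of_le hmc hcol
      rw [show ((m+1 : Nat):Int) + 1 = ((m:Int) + 1) + 1 by push_cast; ring]
      rw [PySem.List.pyRange_one_succ_right (by omega : (1:Int) ≤ (m:Int) + 1)]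
      rw [List.foldl_append, ih hm, List.foldl_cons, List.foldl_nil]
      set cur : List Int := pvGo (k+1) prev (fila.take m) 1 [0] with hcurdef
      have hcl : cur.length = m + 1 := by
        rw [hcurdef, pvGo_length]; simp [List.length_take]; omega
      set T : List (List Int) := pvZ col :: rs with hTdef
      set mid : List Int := cur ++ List.replicate (col - m) (0:Int) with hmiddef
      set t' : List (List Int) := T ++ mid :: Z' with htdef
      have hTlen : T.length = k + 1 := by simp [hTdef, hlen]
      have e1 : ((k:Int) + 1) - 1 = ((k:Nat) : Int) := by ring
      have e2 : ((m:Int) + 1) - 1 = ((m:Nat) : Int) := by ring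
      have efila : PySem.List.pyGetD matriz ((k:Nat):Int) [] = fila := by
        rw [PySem.List.pyGetD_natCast, hfila]
      have ht1 : PySem.List.pyGetD t' ((k:Nat):Int) [] = prev := by
        rw [PySem.List.pyGetD_natCast, htdef, List.getD_append _ _ _ _ (by omega)]
        rw [hTdef]
        rw [show k = rs.length from hlen.symm, pv_getD_last, hprev]
      have ht2 : PySem.List.pyGetD t' ((k:Int) + 1) [] = mid := by
        rw [show ((k:Int) + 1) = (((k+1 : Nat)) : Int) by push_cast; ring]
        rw [PySem.List.pyGetD_natCast, htdef,
          List.getD_append_right _ _ _ _ (by omega), hTlen]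
        simp
      have hcread : PySem.List.pyGetD fila ((m:Nat):Int) 0 = fila.getD m 0 :=
        PySem.List.pyGetD_natCast fila m 0
      have hup : PySem.List.pyGetD prev ((m:Int) + 1) 0 = prev.getD (m+1) 0 := by
        rw [show ((m:Int) + 1) = (((m+1 : Nat)) : Int) by push_cast; ring,
          PySem.List.pyGetD_natCast]
      have hleft : PySem.List.pyGetD mid ((m:Nat):Int) 0 = cur.getLastD 0 := by
        rw [PySem.List.pyGetD_natCast, hmiddef, List.getD_append _ _ _ _ (by omega)]
        exact pv_getD_pred cur m hcl
      have hset : ∀ v : Int, pvSet2 t' ((k:Int) + 1) ((m:Int) + 1) v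
          = T ++ ((cur ++ [v]) ++ List.replicate (col - (m+1)) (0:Int)) :: Z' := by
        intro v
        unfold pvSet2
        have htn1 : ((k:Int) + 1).toNat = k + 1 := by omega
        have htn2 : ((m:Int) + 1).toNat = m + 1 := by omega
        rw [htn1, htn2]
        have hgd : t'.getD (k+1) [] = mid := by
          rw [htdef, List.getD_append_right _ _ _ _ (by omega), hTlen]; simp
        rw [hgd]
        have hmidset : mid.set (m+1) v = (cur ++ [v]) ++ List.replicate (col - (m+1)) (0:Int) := by
          rw [hmiddef, show col - m = (col - (m+1)) + 1 by omega, List.replicate_succ,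
            List.set_append]
          simp [hcl]
        rw [hmidset, htdef, List.set_append]
        simp [hTlen]
      have htake : fila.take (m+1) = fila.take m ++ [fila.getD m 0] := by
        rw [List.take_add_one, List.getElem?_eq_getElem hmf, List.getD_eq_getElem fila 0 hmf]
        simp
      have hsnoc : pvGo (k+1) prev (fila.take (m+1)) 1 [0]
          = cur ++ [pvCell (k+1) (m+1) (prev.getD (m+1) 0) (cur.getLastD 0) (fila.getD m 0)] := by
        rw [htake, pvGo_snoc]
        rw [hcurdef]
        have hl : (fila.take m).length = m := by simp [List.length_take]; omega
        rw [hl, show 1 + m = m + 1 by omega]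
      have hval : pvInnerA matriz ((k:Int) + 1) t' ((m:Int) + 1)
          = pvSet2 t' ((k:Int) + 1) ((m:Int) + 1)
              (pvCell (k+1) (m+1) (prev.getD (m+1) 0) (cur.getLastD 0) (fila.getD m 0)) := by
        unfold pvInnerA
        rw [e1, e2, efila, ht1, ht2, hcread, hup, hleft]
        exact pv_branch k m (prev.getD (m+1) 0) (cur.getLastD 0) (fila.getD m 0)
          (fun v => pvSet2 t' ((k:Int) + 1) ((m:Int) + 1) v)
      rw [hval, hset, hsnoc]

-- the outer fold of A builds the table, up to k rows
theorem pv_outerA (matriz : List (List Int)) (hpre : Pre_buscarOptimos matriz) :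
    ∀ (k : Nat), k ≤ matriz.length →
      (PySem.List.pyRange 1 ((k : Int) + 1) 1).foldl
        (fun t i =>
          (PySem.List.pyRange 1 ((PySem.List.pyGetD t 0 []).length) 1).foldl (pvInnerA matriz i) t)
        (List.replicate (matriz.length + 1) (pvZ (matriz.headD []).length))
      = (pvZ (matriz.headD []).length
          :: pvRows (matriz.headD []).length (matriz.take k) 1 (pvZ (matriz.headD []).length))
        ++ List.replicate (matriz.length - k) (pvZ (matriz.headD []).length) := by
  intro k
  induction k with
  | zero =>
      intro _
      rw [show ((0:Nat):Int) + 1 = 1 by simp]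
      rw [show PySem.List.pyRange 1 1 1 = [] from rfl, List.foldl_nil]
      simp [pvRows, List.replicate_succ]
  | succ k ih =>
      intro hk1
      have hk : k ≤ matriz.length := Nat.le_of_succ_le hk1
      have hkl : k < matriz.length := hk1
      set col := (matriz.headD []).length with hcoldef
      rw [show ((k+1 : Nat):Int) + 1 = ((k:Int) + 1) + 1 by push_cast; ring]
      rw [PySem.List.pyRange_one_succ_right (by omega : (1:Int) ≤ (k:Int) + 1)]
      rw [List.foldl_append, ih hk, List.foldl_cons, List.foldl_nil]
      set rs : List (List Int) := pvRows col (matriz.take k) 1 (pvZ col) with hrsdef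
      have hlen : rs.length = k := by
        rw [hrsdef, pvRows_length]; simp [List.length_take]; omega
      set fila : List Int := matriz.getD k [] with hfiladef
      have hfget : fila = matriz[k] := by rw [hfiladef, List.getD_eq_getElem matriz [] hkl]
      have hcol : col ≤ fila.length := by
        rw [hfget]; exact hpre.2 _ (List.getElem_mem hkl)
      have hsplit : (pvZ col :: rs) ++ List.replicate (matriz.length - k) (pvZ col)
          = (pvZ col :: rs) ++ pvZ col :: List.replicate (matriz.length - (k+1)) (pvZ col) := by
        rw [show matriz.length - k = (matriz.length - (k+1)) + 1 by omega, List.replicate_succ]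
      rw [hsplit]
      have hhead : PySem.List.pyGetD
          ((pvZ col :: rs) ++ pvZ col :: List.replicate (matriz.length - (k+1)) (pvZ col)) 0 []
          = pvZ col := by
        rw [pv_pyGetD_zero]; simp
      simp only [hhead]
      rw [show ((pvZ col).length : Int) = ((col:Int) + 1) by simp [pvZ]]
      rw [pv_innerA matriz col k fila hfiladef hcol rs _ hlen _ rfl col le_rfl]
      rw [show pvGo (k+1) (rs.getLastD (pvZ col)) (fila.take col) 1 [0]
            = pvRow (k+1) (rs.getLastD (pvZ col)) fila col from rfl]
      rw [List.take_add_one, List.getElem?_eq_getElem hkl]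
      simp only [Option.toList_some]
      rw [← hfget]
      rw [pvRows_snoc]
      have hlt : (List.take k matriz).length = k := by simp [List.length_take]; omega
      rw [hlt, show 1 + k = k + 1 by omega, ← hrsdef]
      simp

-- ===== bridging both sides to pvVal =====

-- one row of the recurrence's values
def pvRowV (matriz : List (List Int)) (col i : Nat) : List Int :=
  (List.range (col+1)).map (pvVal matriz i)

theorem pvZ_eq_rowV (matriz : List (List Int)) (col : Nat) :
    pvZ col = pvRowV matriz col 0 := by
  unfold pvZ pvRowV
  symm
  rw [List.eq_replicate_iff]
  constructor
  · simp
  · intro b hb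
    obtain ⟨t, _, rfl⟩ := List.mem_map.mp hb
    rw [pvVal]


-- pvRow computes the recurrence's row i+1 from row i
theorem pvRowV_getD (matriz : List (List Int)) (col i m : Nat) (hm : m ≤ col) :
    (pvRowV matriz col i).getD m 0 = pvVal matriz i m := by
  unfold pvRowV
  have h1 : m < (List.range (col+1)).length := by simp; omega
  rw [List.getD_eq_getElem _ _ (by simpa using h1)]
  simp

theorem pvRowV_last (matriz : List (List Int)) (i m : Nat) :
    ((List.range (m+1)).map (pvVal matriz i)).getLastD 0 = pvVal matriz i m := by
  rw [List.range_succ, List.map_append]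
  simp

theorem pvCell_eq (matriz : List (List Int)) (col k m : Nat) (hm : m + 1 ≤ col)
    (fila : List Int) (hfila : fila = matriz.getD k []) :
    pvCell (k+1) (m+1) ((pvRowV matriz col k).getD (m+1) 0)
        (pvVal matriz (k+1) m) (fila.getD m 0)
      = pvVal matriz (k+1) (m+1) := by
  rw [pvRowV_getD matriz col k (m+1) hm, pvVal_succ, hfila]
  unfold pvCell
  have h1 : ((k+1 : Nat) = 1 ∧ (m+1 : Nat) = 1) ↔ (k = 0 ∧ m = 0) := by omega
  by_cases hc : (matriz.getD k []).getD m 0 = 0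
  · rw [if_pos hc, if_pos (Or.inl hc)]
  · rw [if_neg hc]
    split_ifs with h2 h3 h3 <;> first | rfl | (exfalso; tauto)

theorem pvRow_eq_rowV (matriz : List (List Int)) (col k : Nat)
    (fila : List Int) (hfila : fila = matriz.getD k []) (hcol : col ≤ fila.length) :
    pvRow (k+1) (pvRowV matriz col k) fila col = pvRowV matriz col (k+1) := by
  unfold pvRow
  suffices h : ∀ m, m ≤ col → pvGo (k+1) (pvRowV matriz col k) (fila.take m) 1 [0]
      = (List.range (m+1)).map (pvVal matriz (k+1)) by
    exact h col le_rfl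
  intro m
  induction m with
  | zero =>
      intro _
      simp [pvGo]
      rw [pvVal]
  | succ m ih =>
      intro hm1
      have hm : m ≤ col := by omega
      have hmf : m < fila.length := by omega
      have htake : fila.take (m+1) = fila.take m ++ [fila.getD m 0] := by
        rw [List.take_add_one, List.getElem?_eq_getElem hmf, List.getD_eq_getElem fila 0 hmf]
        simp
      rw [htake, pvGo_snoc, ih hm]
      have hl : (fila.take m).length = m := by simp [List.length_take]; omega
      rw [hl, show 1 + m = m + 1 by omega, pvRowV_last,
        pvCell_eq matriz col k m hm1 fila hfila]
      rw [List.range_succ (n := m+1), List.map_append]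
      simp


theorem pvRows_eq_rowV (matriz : List (List Int)) (col : Nat)
    (h : ∀ row ∈ matriz, col ≤ row.length) :
    ∀ (l : List (List Int)) (k : Nat), l = matriz.drop k →
      pvRows col l (k+1) (pvRowV matriz col k)
        = (List.range l.length).map (fun t => pvRowV matriz col (k+1+t)) := by
  intro l
  induction l with
  | nil => intro k _; simp [pvRows]
  | cons fila rest ih =>
      intro k hdrop
      have hkl : k < matriz.length := by
        by_contra hge
        rw [List.drop_eq_nil_of_le (by omega)] at hdrop
        simp at hdrop
      have hfila : fila = matriz.getD k [] := by
        rw [List.getD_eq_getElem matriz [] hkl]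
        have := List.drop_eq_getElem_cons hkl
        rw [this] at hdrop
        exact (List.cons.injEq .. ▸ hdrop.symm).1.symm
      have hrest : rest = matriz.drop (k+1) := by
        have := List.drop_eq_getElem_cons hkl
        rw [this] at hdrop
        exact (List.cons.injEq .. ▸ hdrop.symm).2.symm
      have hcol : col ≤ fila.length := by
        apply h
        rw [hfila, List.getD_eq_getElem matriz [] hkl]
        exact List.getElem_mem hkl
      show pvRow (k+1) (pvRowV matriz col k) fila col
            :: pvRows col rest (k+2) (pvRow (k+1) (pvRowV matriz col k) fila col) = _
      rw [pvRow_eq_rowV matriz col k fila hfila hcol]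
      rw [show k+2 = (k+1)+1 from rfl, ih (k+1) hrest]
      rw [List.length_cons, List.range_succ_eq_map, List.map_cons, List.map_map]
      congr 1
      apply List.map_congr_left
      intro a _
      show pvRowV matriz col (k+1+1+a) = pvRowV matriz col (k+1+(a+1))
      congr 1
      omega


-- B's inner fold appends the recurrence's row, preserving the cache invariant
theorem pv_alt_inner (matriz : List (List Int)) (i : Nat) :
    ∀ (l : List Nat) (acc : List Int) (memo : PySem.Dict (Nat × Nat) Int), pvInv matriz memo →
      (l.foldl (fun (st2 : List Int × PySem.Dict (Nat × Nat) Int) j =>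
          let v := pvValM matriz i j st2.2
          (st2.1 ++ [v.1], v.2)) (acc, memo))
        = (acc ++ l.map (pvVal matriz i),
           (l.foldl (fun (st2 : List Int × PySem.Dict (Nat × Nat) Int) j =>
          let v := pvValM matriz i j st2.2
          (st2.1 ++ [v.1], v.2)) (acc, memo)).2)
      ∧ pvInv matriz (l.foldl (fun (st2 : List Int × PySem.Dict (Nat × Nat) Int) j =>
          let v := pvValM matriz i j st2.2
          (st2.1 ++ [v.1], v.2)) (acc, memo)).2 := by
  intro l
  induction l with
  | nil => intro acc memo hinv; simp; exact hinv
  | cons j rest ih =>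
      intro acc memo hinv
      have hs := pvValM_spec matriz (i+j) i j memo le_rfl hinv
      rw [List.foldl_cons]
      simp only []
      obtain ⟨h1, h2⟩ := ih (acc ++ [(pvValM matriz i j memo).1]) (pvValM matriz i j memo).2 hs.2
      rw [h1]
      refine ⟨?_, h2⟩
      rw [List.map_cons, hs.1]
      simp


-- B's outer fold builds the grid of recurrence values
theorem pv_alt_outer (matriz : List (List Int)) (col : Nat) :
    ∀ (l : List Nat) (acc : List (List Int)) (memo : PySem.Dict (Nat × Nat) Int), pvInv matriz memo →
      ((l.foldl (fun (st : List (List Int) × PySem.Dict (Nat × Nat) Int) i =>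
          let r := (List.range (col+1)).foldl
            (fun (st2 : List Int × PySem.Dict (Nat × Nat) Int) j =>
              let v := pvValM matriz i j st2.2
              (st2.1 ++ [v.1], v.2)) ([], st.2)
          (st.1 ++ [r.1], r.2)) (acc, memo))).1
        = acc ++ l.map (fun i => pvRowV matriz col i) := by
  intro l
  induction l with
  | nil => intro acc memo _; simp
  | cons i rest ih =>
      intro acc memo hinv
      rw [List.foldl_cons]
      simp only []
      obtain ⟨h1, h2⟩ := pv_alt_inner matriz i (List.range (col+1)) [] memo hinv
      rw [h1]
      simp only []
      rw [ih _ _ h2]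
      rw [List.map_cons]
      simp [pvRowV]


theorem pv_alt_eq (matriz : List (List Int)) :
    buscarOptimos_alt matriz
      = (List.range (matriz.length+1)).map (fun i => pvRowV matriz (matriz.headD []).length i) := by
  unfold buscarOptimos_alt
  simp only [pv_pyGetD_zero]
  rw [pv_alt_outer matriz (matriz.headD []).length (List.range (matriz.length+1)) []
    PySem.Dict.empty (fun i j r hr => by simp [PySem.Dict.get?_empty] at hr)]
  simp


-- ===== VERDICT (by name: the statement is the Claim_ definition above) =====
theorem buscarOptimos_spec : Claim_equal_buscarOptimos := by
  intro matriz _ hpre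
  unfold Spec_buscarOptimos
  rw [pv_alt_eq]
  unfold buscarOptimos
  rw [pv_pyGetD_zero matriz]
  simp only [List.length_replicate, Nat.cast_add, Nat.cast_one,
    show ∀ c, List.replicate (c + 1) (0:Int) = pvZ c from fun _ => rfl]
  rw [pv_outerA matriz hpre matriz.length le_rfl]
  rw [List.take_length, Nat.sub_self, List.replicate_zero, List.append_nil]
  set col := (matriz.headD []).length with hcol
  rw [pvZ_eq_rowV matriz col]
  have hR := pvRows_eq_rowV matriz col hpre.2 matriz 0 (by simp)
  norm_num at hR
  rw [hR]
  rw [List.range_succ_eq_map, List.map_cons, List.map_map]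
  congr 1
  apply List.map_congr_left
  intro a _
  show pvRowV matriz col (1+a) = pvRowV matriz col (a+1)
  congr 1
  omega
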